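-- pv_equiv track=rewrite | github.com/vhsw/CodeMasters_Tourney | Python 3/cipher26.py | cipher26
-- ===== SOURCE A (Python) =====
-- def cipher26(message):
--     s = 0
--     res = []
--     for l in message:
--         dec = (ord(l)-ord('a')-s) % 26
--         res.append(chr(dec+ord('a')))
--         s += dec
--     return ''.join(res)
-- ===== SOURCE B (Python) =====
-- def cipher26(message):
--     # Stateless: the running sum telescopes mod 26 to the previous character's
--     # code, so each decoded letter is the mod-26 difference of consecutive
--     # characters ('a' prepended as the virtual predecessor). No accumulator.
--     return ''.join(chr((ord(c) - ord(p)) % 26 + ord('a'))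
--                    for p, c in zip('a' + message, message))
-- ===== Notes on version B (the rewrite author's own statement) =====
-- stated objective: simpler
-- what changed: Eliminates A's mutable running-sum state entirely: since the sum telescopes mod 26 to the previous character's code, B is a stateless one-liner mapping each pair of consecutive characters (with 'a' prepended) to their mod-26 difference.
import Mathlib
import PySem

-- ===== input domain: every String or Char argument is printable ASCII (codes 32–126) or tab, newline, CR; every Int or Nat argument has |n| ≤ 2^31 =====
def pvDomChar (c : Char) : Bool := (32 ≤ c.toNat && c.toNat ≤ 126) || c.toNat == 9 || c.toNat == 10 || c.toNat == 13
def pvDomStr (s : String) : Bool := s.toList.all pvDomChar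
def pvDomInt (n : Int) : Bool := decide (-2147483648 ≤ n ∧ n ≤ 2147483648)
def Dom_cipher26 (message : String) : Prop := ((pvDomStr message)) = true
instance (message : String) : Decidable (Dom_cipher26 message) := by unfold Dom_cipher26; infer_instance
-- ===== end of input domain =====

-- B replaces A's stateful running-sum loop by a stateless map over consecutive character pairs (simpler).

-- ===== PORT A =====
-- state: (s, res); dec = (ord l - ord 'a' - s) % 26; append chr(dec + 97); s += dec
def cipher26Loop (chars : List Char) (s : Int) (res : List Char) : List Char :=
  match chars with
  | [] => res
  | l :: rest =>
    let dec := PySem.Int.mod ((l.toNat : Int) - 97 - s) 26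
    cipher26Loop rest (s + dec) (res ++ [Char.ofNat (dec + 97).toNat])

def cipher26 (message : String) : String :=
  String.mk (cipher26Loop message.toList 0 [])

-- ===== PORT B =====
-- stateless: zip 'a'+message with message, map each pair to its mod-26 difference
def cipher26_alt (message : String) : String :=
  String.mk ((('a' :: message.toList).zip message.toList).map
    (fun pc => Char.ofNat (PySem.Int.mod ((pc.2.toNat : Int) - (pc.1.toNat : Int)) 26 + 97).toNat))

-- ===== PRECONDITION & SPEC =====
def Spec_cipher26 (message : String) (out : String) : Prop := out = cipher26_alt message
instance (message : String) (out : String) : Decidable (Spec_cipher26 message out) := by unfold Spec_cipher26; infer_instance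

-- ===== CLAIM (what is proved, stated in full; the proofs are below) =====
def Claim_equal_cipher26 : Prop := ∀ (message : String), Dom_cipher26 message → Spec_cipher26 message (cipher26 message)

-- ===== LEMMAS AND PROOFS =====

theorem cipher26_loop_eq_zip (chars : List Char) (p : Char) (s : Int) (res : List Char)
    (h : s % 26 = ((p.toNat : Int) - 97) % 26) :
    cipher26Loop chars s res
      = res ++ ((p :: chars).zip chars).map
          (fun pc => Char.ofNat (PySem.Int.mod ((pc.2.toNat : Int) - (pc.1.toNat : Int)) 26 + 97).toNat) := by
  induction chars generalizing p s res with
  | nil => simp [cipher26Loop]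
  | cons l rest ih =>
    simp only [cipher26Loop, List.zip_cons_cons, List.map_cons]
    have hmod : PySem.Int.mod ((l.toNat : Int) - 97 - s) 26
        = PySem.Int.mod ((l.toNat : Int) - (p.toNat : Int)) 26 := by
      rw [PySem.Int.mod_eq_emod_of_pos (by norm_num),
          PySem.Int.mod_eq_emod_of_pos (by norm_num)]
      omega
    rw [hmod, ih l _ _ ?_]
    · simp
    · rw [PySem.Int.mod_eq_emod_of_pos (by norm_num)]
      have h26 : ((l.toNat : Int) - (p.toNat : Int)) % 26 % 26
          = ((l.toNat : Int) - (p.toNat : Int)) % 26 := Int.emod_emod_of_dvd _ dvd_rfl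
      omega

-- ===== VERDICT (by name: the statement is the Claim_ definition above) =====
theorem cipher26_spec : Claim_equal_cipher26 := by
  intro message _
  unfold Spec_cipher26 cipher26 cipher26_alt
  rw [cipher26_loop_eq_zip _ 'a' 0 [] (by decide)]
  rfl
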